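-- pv_equiv track=rewrite | github.com/SunnyYadav16/data-structure-and-algorithms | basics/basic maths/count_odd_digits_in_number.py | count_odd_digits
-- ===== SOURCE A (Python) =====
-- def count_odd_digits(num):
--     n = abs(num)
--     if n == 0:
--         return 0
--     count = 0
--
--     while n > 0:
--         digit = n % 10
--         if digit % 2 != 0:
--             count += 1
--         n = n // 10
--
--     return count
-- ===== SOURCE B (Python) =====
-- def count_odd_digits(num):
--     return sum(c in "13579" for c in str(abs(num)))
-- ===== Notes on version B (the rewrite author's own statement) =====
-- stated objective: idiomatic
-- what changed: B counts odd digit characters of the decimal string representation in one comprehension instead of peeling digits with an arithmetic modulus/division loop and a mutable counter.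
import Mathlib
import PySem

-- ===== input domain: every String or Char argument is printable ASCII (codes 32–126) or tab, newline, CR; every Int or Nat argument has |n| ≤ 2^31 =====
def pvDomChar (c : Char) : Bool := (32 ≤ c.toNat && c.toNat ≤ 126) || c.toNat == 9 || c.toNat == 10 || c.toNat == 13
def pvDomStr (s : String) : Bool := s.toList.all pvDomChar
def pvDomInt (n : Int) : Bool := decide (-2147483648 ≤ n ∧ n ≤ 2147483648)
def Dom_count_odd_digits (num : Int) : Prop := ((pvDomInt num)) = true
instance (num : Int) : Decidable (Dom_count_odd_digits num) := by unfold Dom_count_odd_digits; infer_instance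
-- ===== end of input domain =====

-- B counts odd digit characters of the decimal string of abs(num) in one pass instead of peeling digits with an arithmetic loop.


-- ===== PORT A =====
-- the while loop: n ≥ 0 throughout, so it runs on Nat (Python's % and // agree with Nat.mod/div on nonnegatives)
def pvLoopA (n : Nat) (count : Int) : Int :=
  if h : 0 < n then
    pvLoopA (n / 10) (count + if n % 10 % 2 ≠ 0 then 1 else 0)
  else count
termination_by n
decreasing_by exact Nat.div_lt_self h (by norm_num)

def count_odd_digits (num : Int) : Int :=
  let n := num.natAbs
  if n = 0 then 0 else pvLoopA n 0

-- ===== PORT B =====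
-- 'c in "13579"' for a single character c is exactly character membership
def count_odd_digits_alt (num : Int) : Int :=
  (PySem.Int.toStr |num|).toList.foldl
    (fun acc c => acc + (if c ∈ "13579".toList then 1 else 0)) 0

-- ===== PRECONDITION & SPEC =====
def Spec_count_odd_digits (num : Int) (out : Int) : Prop := out = count_odd_digits_alt num
instance (num : Int) (out : Int) : Decidable (Spec_count_odd_digits num out) := by unfold Spec_count_odd_digits; infer_instance

-- ===== CLAIM (what is proved, stated in full; the proofs are below) =====
def Claim_equal_count_odd_digits : Prop := ∀ (num : Int), Dom_count_odd_digits num → Spec_count_odd_digits num (count_odd_digits num)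

-- ===== LEMMAS AND PROOFS =====

def pvOddChar (c : Char) : Bool := c ∈ "13579".toList

def pvOddN (n : Nat) : Nat :=
  if h : 0 < n then (if n % 10 % 2 = 1 then 1 else 0) + pvOddN (n / 10) else 0
termination_by n
decreasing_by exact Nat.div_lt_self h (by norm_num)

lemma pvLoopA_eq (n : Nat) (c : Int) : pvLoopA n c = c + (pvOddN n : Int) := by
  induction n using Nat.strong_induction_on generalizing c with
  | _ n ih =>
    rw [pvLoopA, pvOddN]
    by_cases h : 0 < n
    · simp only [h, dif_pos]
      rw [ih (n / 10) (Nat.div_lt_self h (by norm_num))]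
      have h10 : n % 10 < 10 := Nat.mod_lt _ (by norm_num)
      interval_cases hm : n % 10 <;> simp <;> ring
    · simp [h]

lemma pvFoldl_cnt (l : List Char) (a : Int) :
    l.foldl (fun acc c => acc + (if c ∈ "13579".toList then 1 else 0)) a
      = a + (l.countP pvOddChar : Int) := by
  induction l generalizing a with
  | nil => simp
  | cons x xs ih =>
    simp only [List.foldl_cons, List.countP_cons, ih, pvOddChar]
    rcases Decidable.em (x ∈ "13579".toList) with h | h <;> simp only [h, if_pos, if_neg, not_false_iff, decide_eq_true_eq] <;> push_cast <;> ring

lemma pvDigitChar_odd (d : Nat) (h : d < 10) :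
    (if pvOddChar (Nat.digitChar d) then 1 else 0) = (if d % 2 = 1 then 1 else 0) := by
  interval_cases d <;> decide

lemma pvCore (fuel : Nat) : ∀ (n : Nat) (ds : List Char), n < fuel →
    ((Nat.toDigitsCore 10 fuel n ds).countP pvOddChar)
      = pvOddN n + ds.countP pvOddChar := by
  induction fuel with
  | zero => intro n ds h; omega
  | succ f ih =>
    intro n ds h
    rw [Nat.toDigitsCore]
    by_cases h0 : n / 10 = 0
    · simp only [h0, if_true]
      rw [List.countP_cons]
      rw [pvOddN]
      by_cases hn : 0 < n
      · simp only [hn, dif_pos, h0]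
        have hz : pvOddN 0 = 0 := by rw [pvOddN]; simp
        rw [hz]
        have := pvDigitChar_odd (n % 10) (Nat.mod_lt _ (by norm_num))
        simp only [pvOddChar] at this ⊢
        omega
      · have hn0 : n = 0 := by omega
        subst hn0
        simp only [hn, dif_neg, not_false_iff]
        simp [pvOddChar]
        decide
    · rw [if_neg h0]
      have hlt : n / 10 < f := by
        have : n / 10 < n := Nat.div_lt_self (by omega) (by norm_num)
        omega
      rw [ih (n / 10) _ hlt, List.countP_cons]
      have hn : 0 < n := by omega
      conv_rhs => rw [pvOddN]
      rw [dif_pos hn]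
      have := pvDigitChar_odd (n % 10) (Nat.mod_lt _ (by norm_num))
      simp only [pvOddChar] at this ⊢
      split_ifs at this ⊢ <;> omega

lemma pvAlt_eq (num : Int) : count_odd_digits_alt num = (pvOddN num.natAbs : Int) := by
  unfold count_odd_digits_alt
  rw [PySem.Int.toList_toStr]
  unfold PySem.Int.toChars
  rw [Int.abs_eq_natAbs]
  have habs : ¬ ((num.natAbs : Int) < 0) := by omega
  simp only [habs, if_false, Int.toNat_natCast]
  unfold Nat.toDigits
  rw [pvFoldl_cnt, pvCore (num.natAbs + 1) num.natAbs [] (by omega)]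
  simp

-- ===== VERDICT (by name: the statement is the Claim_ definition above) =====
theorem count_odd_digits_spec : Claim_equal_count_odd_digits := by
  intro num _
  unfold Spec_count_odd_digits
  rw [pvAlt_eq]
  unfold count_odd_digits
  by_cases h : num.natAbs = 0
  · simp [h, pvOddN]
  · simp only [h, if_neg, not_false_iff]
    rw [pvLoopA_eq]
    simp
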